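-- pv_equiv track=rewrite | github.com/duanebailey/CurlingNumberSequences | clib.py | cnLength
-- ===== SOURCE A (Python) =====
-- def sublists(s):
--     for i in range(len(s)):
--         yield s[i:]
--
-- def cnLength(s):
--     """Version of cn(s) that returns a tuple (cn(s), len(Y))"""
--     kMax = 0
--     ylen = 0
--     for y in sublists(s):
--         k = 0
--         sCopy = list(s)
--         while sCopy[len(sCopy) - len(y):] == y:
--             k += 1
--             sCopy = sCopy[:len(sCopy) -len(y)]
--         if k > kMax:
--             kMax = k
--             yLen = len(y)
--     return (kMax, yLen)
-- ===== SOURCE B (Python) =====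
-- def _lcp(a, b):
--     """Length of the longest common prefix of lists a and b."""
--     e = 0
--     for x, y in zip(a, b):
--         if x != y:
--             break
--         e += 1
--     return e
--
-- def cnLength(s):
--     """Version of cn(s) that returns a tuple (cn(s), len(Y))"""
--     n = len(s)
--     r = s[::-1]
--     kMax = 0
--     yLen = 0
--     for L in range(n, 0, -1):
--         # suffix block of length L repeats 1 + lcp(r[L:], r) // L times at the end
--         k = _lcp(r[L:], r) // L + 1
--         if k > kMax:
--             kMax = k
--             yLen = L
--     return (kMax, yLen)
-- ===== Notes on version B (the rewrite author's own statement) =====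
-- stated objective: alternative
-- what changed: Instead of re-slicing and repeatedly copying the list for every suffix, B reverses the list once and, for each block length L, computes the repetition count arithmetically as lcp(r[L:], r) // L + 1 from a single longest-common-prefix scan.
import Mathlib
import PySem

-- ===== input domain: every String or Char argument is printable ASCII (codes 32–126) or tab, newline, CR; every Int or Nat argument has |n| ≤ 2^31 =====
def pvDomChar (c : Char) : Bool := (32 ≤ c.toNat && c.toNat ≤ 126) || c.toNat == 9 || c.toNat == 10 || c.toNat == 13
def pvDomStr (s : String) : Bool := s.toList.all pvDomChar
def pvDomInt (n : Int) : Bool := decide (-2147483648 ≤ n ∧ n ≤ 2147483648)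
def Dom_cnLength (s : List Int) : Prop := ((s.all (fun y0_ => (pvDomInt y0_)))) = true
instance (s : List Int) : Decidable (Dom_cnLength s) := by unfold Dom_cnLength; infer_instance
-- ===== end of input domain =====

-- B replaces A's per-suffix strip-and-copy while-loop by a longest-common-prefix scan on
-- the reversed list (repetition count = lcp // blocklength + 1) — a different algorithm of
-- similar cost.  Equivalence is proved for nonempty inputs (A raises UnboundLocalError on []).

-- ===== PORT A =====
-- inner while-loop of A: while sCopy[len(sCopy)-len(y):] == y: k += 1; sCopy = sCopy[:len(sCopy)-len(y)]
-- fuel makes the loop total (each true iteration shortens sCopy by len(y) ≥ 1, so fuel = len(s)+1 is never exhausted for the nonempty y that A passes)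
def pvStripA : Nat → List Int → Int → List Int → Int
  | 0, _, k, _ => k
  | fuel+1, y, k, sCopy =>
    if PySem.List.slice sCopy (some (PySem.List.len sCopy - PySem.List.len y)) none = y then
      pvStripA fuel y (k + 1) (PySem.List.slice sCopy none (some (PySem.List.len sCopy - PySem.List.len y)))
    else k

def cnLength (s : List Int) : List Int :=
  -- for y in sublists(s): i.e. for i in range(len(s)), y = s[i:]
  let res := (PySem.List.pyRange 0 (PySem.List.len s) 1).foldl
    (fun (acc : Int × Int) i =>
      let y := PySem.List.slice s (some i) none
      let k := pvStripA (s.length + 1) y 0 s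
      if k > acc.1 then (k, PySem.List.len y) else acc)
    (0, 0)
  [res.1, res.2]

-- ===== PORT B =====
-- _lcp(a, b): longest common prefix length of two lists (the zip/break loop of Source B)
def pvLcp : List Int → List Int → Nat
  | x :: a, y :: b => if x = y then pvLcp a b + 1 else 0
  | _, _ => 0

def cnLength_alt (s : List Int) : List Int :=
  let r := s.reverse  -- s[::-1]  (PySem.List.slice?_none_none_neg_one)
  let res := (PySem.List.pyRange (PySem.List.len s) 0 (-1)).foldl
    (fun (acc : Int × Int) L =>
      -- k = _lcp(r[L:], r) // L + 1   (L ≥ 1, so r[L:] is r.drop L.toNat)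
      let k := PySem.Int.floordiv (pvLcp (r.drop L.toNat) r : Int) L + 1
      if k > acc.1 then (k, L) else acc)
    (0, 0)
  [res.1, res.2]

-- ===== PRECONDITION & SPEC =====
-- Pre_ excludes only the empty list, on which A raises UnboundLocalError (yLen is never assigned).
def Pre_cnLength (s : List Int) : Prop := s ≠ []
instance (s : List Int) : Decidable (Pre_cnLength s) := by unfold Pre_cnLength; infer_instance
def pvWitness_cnLength : List Int := [1]

def Spec_cnLength (s : List Int) (out : List Int) : Prop := out = cnLength_alt s
instance (s : List Int) (out : List Int) : Decidable (Spec_cnLength s out) := by unfold Spec_cnLength; infer_instance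

-- ===== CLAIM (what is proved, stated in full; the proofs are below) =====
def Claim_equal_cnLength : Prop := ∀ (s : List Int), Dom_cnLength s → Pre_cnLength s → Spec_cnLength s (cnLength s)

-- ===== LEMMAS AND PROOFS =====

-- proof-side view of A's inner loop: strip matching PREFIX blocks p from the REVERSED list
def pstripN : Nat → List Int → List Int → Nat
  | 0, _, _ => 0
  | fuel+1, p, rc => if rc.take p.length = p then 1 + pstripN fuel p (rc.drop p.length) else 0

theorem pvLcp_le_left : ∀ (a b : List Int), pvLcp a b ≤ a.length := by
  intro a
  induction a with
  | nil => intro b; cases b <;> simp [pvLcp]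
  | cons x a ih =>
    intro b; cases b with
    | nil => simp [pvLcp]
    | cons y b => simp only [pvLcp]; split_ifs <;> simp [Nat.succ_le_succ (ih b)]

theorem pvLcp_getElem? : ∀ (a b : List Int) (i : Nat), i < pvLcp a b → a[i]? = b[i]? := by
  intro a
  induction a with
  | nil => intro b i h; cases b <;> simp [pvLcp] at h
  | cons x a ih =>
    intro b i h
    cases b with
    | nil => simp [pvLcp] at h
    | cons y b =>
      simp only [pvLcp] at h
      split_ifs at h with hxy
      · cases i with
        | zero => simp [hxy]
        | succ j => simpa using ih b j (by omega)
      · omega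

theorem le_pvLcp : ∀ (a b : List Int) (k : Nat), k ≤ a.length → k ≤ b.length →
    (∀ i, i < k → a[i]? = b[i]?) → k ≤ pvLcp a b := by
  intro a
  induction a with
  | nil => intro b k h1 _ _; simp at h1; simp [h1]
  | cons x a ih =>
    intro b k h1 h2 h
    cases b with
    | nil => simp at h2; simp [h2]
    | cons y b =>
      cases k with
      | zero => simp
      | succ j =>
        have hxy : x = y := by have := h 0 (by omega); simpa using this
        simp only [pvLcp, if_pos hxy]
        have := ih b j (by simpa using h1) (by simpa using h2)
          (fun i hi => by simpa using h (i+1) (by omega))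
        omega

theorem pvLcp_ge_iff : ∀ (L : Nat) (a b : List Int),
    L ≤ pvLcp a b ↔ (a.take L = b.take L ∧ L ≤ a.length ∧ L ≤ b.length) := by
  intro L a b
  constructor
  · intro h
    have h1 : L ≤ a.length := le_trans h (pvLcp_le_left a b)
    have h2 : L ≤ b.length := by
      have : pvLcp a b ≤ b.length := by
        clear h h1
        induction a generalizing b with
        | nil => cases b <;> simp [pvLcp]
        | cons x a ih =>
          cases b with
          | nil => simp [pvLcp]
          | cons y b => simp only [pvLcp]; split_ifs <;> simp [Nat.succ_le_succ (ih b)]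
      omega
    refine ⟨?_, h1, h2⟩
    apply List.ext_getElem?
    intro i
    by_cases hi : i < L
    · rw [List.getElem?_take_of_lt hi, List.getElem?_take_of_lt hi]
      exact pvLcp_getElem? a b i (by omega)
    · rw [List.getElem?_eq_none (by simp; omega), List.getElem?_eq_none (by simp; omega)]
  · rintro ⟨ht, h1, h2⟩
    apply le_pvLcp a b L h1 h2
    intro i hi
    have := congrArg (fun l => l[i]?) ht
    simpa [List.getElem?_take_of_lt hi] using this

theorem pstripN_succ (f : Nat) (p rc : List Int) :
    pstripN (f+1) p rc = if rc.take p.length = p then 1 + pstripN f p (rc.drop p.length) else 0 := rfl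

theorem pvLcp_shift (r : List Int) (L : Nat) (hL : 1 ≤ L)
    (hTake : (r.drop L).take L = r.take L) (hLen : L ≤ (r.drop L).length) :
    pvLcp (r.drop L) r = L + pvLcp ((r.drop L).drop L) (r.drop L) := by
  have hn : (r.drop L).length = r.length - L := by simp
  have hnn : (r.drop L).length ≤ r.length := by simp
  have heL : L ≤ pvLcp (r.drop L) r := by
    apply le_pvLcp _ _ L (by omega) (by omega)
    intro i hi
    have := congrArg (fun l => l[i]?) hTake
    simpa [List.getElem?_take_of_lt hi] using this
  have hee : pvLcp (r.drop L) r ≤ (r.drop L).length := pvLcp_le_left _ _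
  have hee' : pvLcp ((r.drop L).drop L) (r.drop L) ≤ ((r.drop L).drop L).length :=
    pvLcp_le_left _ _
  have h1 : pvLcp (r.drop L) r - L ≤ pvLcp ((r.drop L).drop L) (r.drop L) := by
    apply le_pvLcp
    · simp at hee' ⊢; omega
    · omega
    · intro i hi
      rw [List.getElem?_drop, List.getElem?_drop, List.getElem?_drop]
      have := pvLcp_getElem? (r.drop L) r (L + i) (by omega)
      rw [List.getElem?_drop] at this
      exact this
  have h3 : L + pvLcp ((r.drop L).drop L) (r.drop L) ≤ pvLcp (r.drop L) r := by
    apply le_pvLcp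
    · simp at hee' ⊢; omega
    · simp at hee' ⊢; omega
    · intro i hi
      by_cases hiL : i < L
      · have := congrArg (fun l => l[i]?) hTake
        simpa [List.getElem?_take_of_lt hiL] using this
      · have := pvLcp_getElem? ((r.drop L).drop L) (r.drop L) (i - L) (by omega)
        rw [List.getElem?_drop, List.getElem?_drop, List.getElem?_drop] at this
        rw [List.getElem?_drop]
        rw [show L + (L + (i - L)) = L + i by omega, show L + (i - L) = i by omega] at this
        exact this
  omega

theorem pstripN_eq (fuel : Nat) : ∀ (r : List Int) (L : Nat), 1 ≤ L → L ≤ r.length →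
    r.length + 1 ≤ fuel → pstripN fuel (r.take L) r = pvLcp (r.drop L) r / L + 1 := by
  induction fuel with
  | zero => intro r L _ _ h; omega
  | succ f ih =>
    intro r L hL hLr hf
    have hp : (r.take L).length = L := by rw [List.length_take]; omega
    rw [pstripN_succ, hp, if_pos rfl]
    by_cases hc : (r.drop L).take L = r.take L
    · have hLr' : L ≤ (r.drop L).length := by
        have h5 := congrArg List.length hc
        rw [List.length_take, List.length_take] at h5
        omega
      rw [show r.take L = (r.drop L).take L from hc.symm]
      rw [ih (r.drop L) L hL hLr' (by rw [List.length_drop]; omega)]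
      rw [pvLcp_shift r L hL hc hLr']
      rw [Nat.add_comm L _, Nat.add_div_right _ (by omega)]
      omega
    · have hel : ¬ L ≤ pvLcp (r.drop L) r := fun h => hc ((pvLcp_ge_iff L _ _).1 h).1
      have hf1 : 1 ≤ f := by omega
      obtain ⟨f', rfl⟩ : ∃ f', f = f' + 1 := ⟨f - 1, by omega⟩
      rw [pstripN_succ, hp, if_neg hc, Nat.div_eq_of_lt (by omega)]

theorem pvStripA_succ (f : Nat) (y : List Int) (k : Int) (sCopy : List Int) :
    pvStripA (f+1) y k sCopy =
      if PySem.List.slice sCopy (some (PySem.List.len sCopy - PySem.List.len y)) none = y then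
        pvStripA f y (k + 1) (PySem.List.slice sCopy none (some (PySem.List.len sCopy - PySem.List.len y)))
      else k := rfl

theorem pvStripA_eq_pstripN (fuel : Nat) : ∀ (y sCopy : List Int) (k : Int), y ≠ [] →
    pvStripA fuel y k sCopy = k + pstripN fuel y.reverse sCopy.reverse := by
  induction fuel with
  | zero => intro y sCopy k _; simp [pvStripA, pstripN]
  | succ f ih =>
    intro y sCopy k hy
    have hL : 1 ≤ y.length := List.length_pos_iff.mpr hy
    rw [pvStripA_succ, pstripN_succ]
    simp only [PySem.List.len_eq, List.length_reverse]
    by_cases hLe : y.length ≤ sCopy.length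
    · have hm : (0:Int) ≤ (sCopy.length : Int) - (y.length : Int) := by omega
      have htn : ((sCopy.length : Int) - (y.length : Int)).toNat = sCopy.length - y.length := by
        omega
      have hfrom : PySem.List.slice sCopy (some ((sCopy.length : Int) - (y.length : Int))) none
          = sCopy.drop (sCopy.length - y.length) := by
        rw [PySem.List.slice_from sCopy hm, htn]
      have hto : PySem.List.slice sCopy none (some ((sCopy.length : Int) - (y.length : Int)))
          = sCopy.take (sCopy.length - y.length) := by
        rw [PySem.List.slice_to sCopy hm, htn]
      have hsub : sCopy.length - (sCopy.length - y.length) = y.length := by omega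
      have hcond : (sCopy.drop (sCopy.length - y.length) = y)
          ↔ (sCopy.reverse.take y.length = y.reverse) := by
        rw [← List.reverse_inj, List.reverse_drop, hsub]
      rw [hfrom, hto]
      by_cases hc : sCopy.drop (sCopy.length - y.length) = y
      · rw [if_pos hc, if_pos (hcond.mp hc)]
        rw [ih y _ (k+1) hy]
        rw [List.reverse_take, hsub]
        omega
      · rw [if_neg hc, if_neg (fun h => hc (hcond.mpr h))]
        omega
    · have hA : ¬ (PySem.List.slice sCopy (some ((sCopy.length : Int) - (y.length : Int))) none = y) := by
        intro h
        have hlen : (PySem.List.slice sCopy (some ((sCopy.length : Int) - (y.length : Int))) none).length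
            ≤ sCopy.length := by
          rw [PySem.List.slice_some_none]
          simp [PySem.List.clampIdx]
        rw [h] at hlen
        omega
      have hB : ¬ (sCopy.reverse.take y.length = y.reverse) := by
        intro h
        have := congrArg List.length h
        rw [List.length_take, List.length_reverse, List.length_reverse] at this
        omega
      rw [if_neg hA, if_neg hB]
      omega

-- ===== VERDICT (by name: the statement is the Claim_ definition above) =====
theorem cnLength_spec : Claim_equal_cnLength := by
  intro s _ _
  unfold Spec_cnLength cnLength cnLength_alt
  simp only [PySem.List.len_eq]
  rw [PySem.List.pyRange_one, PySem.List.pyRange_neg_one]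
  simp only [Int.sub_zero, Int.toNat_natCast]
  rw [List.foldl_map, List.foldl_map]
  refine congrArg (fun res : Int × Int => [res.1, res.2]) ?_
  refine PySem.List.foldl_congr_mem _ _ _ _ ?_
  intro acc j hj
  rw [List.mem_range] at hj
  simp only [zero_add]
  have hslice : PySem.List.slice s (some (j : Int)) none = s.drop j :=
    PySem.List.slice_from_natCast s j
  have htoNat : ((s.length : Int) - (j : Int)).toNat = s.length - j := by omega
  have hy : s.drop j ≠ [] := by
    intro h
    rw [List.drop_eq_nil_iff] at h
    omega
  have hrevtake : (s.drop j).reverse = s.reverse.take (s.length - j) := by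
    rw [List.reverse_drop]
  have hk : pvStripA (s.length + 1) (s.drop j) 0 s
      = ((pvLcp (s.reverse.drop (s.length - j)) s.reverse / (s.length - j) + 1 : Nat) : Int) := by
    rw [pvStripA_eq_pstripN _ _ _ _ hy, hrevtake]
    rw [pstripN_eq (s.length + 1) s.reverse (s.length - j) (by omega)
      (by rw [List.length_reverse]; omega) (by rw [List.length_reverse])]
    simp
  have hfd : PySem.Int.floordiv ((pvLcp (s.reverse.drop (((s.length : Int) - (j : Int)).toNat)) s.reverse : Nat) : Int)
        ((s.length : Int) - (j : Int))
      = ((pvLcp (s.reverse.drop (s.length - j)) s.reverse / (s.length - j) : Nat) : Int) := by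
    rw [htoNat, show ((s.length : Int) - (j : Int)) = ((s.length - j : Nat) : Int) by omega,
      PySem.Int.floordiv_natCast]
  have hlen : ((s.drop j).length : Int) = (s.length : Int) - (j : Int) := by
    rw [List.length_drop]; omega
  rw [hslice, hk, hfd, hlen]
  push_cast
  ring_nf
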